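-- pv_equiv track=rewrite | github.com/TungDucVu/Assembler | assembler.py | j_type_instruction
-- ===== SOURCE A (Python) =====
-- def j_type_instruction(rd, imm):
--     if imm >= 0:
--         imm = format(imm & ((1 << 21) - 1), '021b')
--     else:
--         imm = format(-imm & ((1 << 21) - 1), '021b')
--         inverted = ''.join('1' if bit == '0' else '0' for bit in imm)
--         twos_comp = bin(int(inverted, 2) + 1)
--         imm = twos_comp
--     imm = int(imm,2)
--     imm20 = (imm >> 20) & 0b1
--     imm10_1 = (imm >> 1) & 0b1111111111
--     imm11 = (imm >> 11) & 0b1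
--     imm19_12 = (imm >> 12) & 0b1111111
--
--     opcode = 0b1101111
--     return format((imm20 << 31) | (imm10_1 << 21) | (imm11 << 20) | (imm19_12 << 12) | (rd << 7) | opcode, '032b')
-- ===== SOURCE B (Python) =====
-- def j_type_instruction(rd, imm):
--     # Branch-free: imm % (1 << 21) is the low 21 bits of imm in two's complement,
--     # replacing A's sign branch and string-level two's-complement construction.
--     v = imm % (1 << 21)
--     imm20 = (v >> 20) & 0b1
--     imm10_1 = (v >> 1) & 0b1111111111
--     imm11 = (v >> 11) & 0b1
--     imm19_12 = (v >> 12) & 0b1111111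
--     opcode = 0b1101111
--     return format((imm20 << 31) | (imm10_1 << 21) | (imm11 << 20) | (imm19_12 << 12) | (rd << 7) | opcode, '032b')
-- ===== Notes on version B (the rewrite author's own statement) =====
-- stated objective: simpler
-- what changed: Replaces A's sign branch and its string-level two's complement (format to 21 bits, invert each character, reparse, add 1, bin(), reparse) with a single branch-free modular reduction imm % (1 << 21); field extraction and final formatting are unchanged.
import Mathlib
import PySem

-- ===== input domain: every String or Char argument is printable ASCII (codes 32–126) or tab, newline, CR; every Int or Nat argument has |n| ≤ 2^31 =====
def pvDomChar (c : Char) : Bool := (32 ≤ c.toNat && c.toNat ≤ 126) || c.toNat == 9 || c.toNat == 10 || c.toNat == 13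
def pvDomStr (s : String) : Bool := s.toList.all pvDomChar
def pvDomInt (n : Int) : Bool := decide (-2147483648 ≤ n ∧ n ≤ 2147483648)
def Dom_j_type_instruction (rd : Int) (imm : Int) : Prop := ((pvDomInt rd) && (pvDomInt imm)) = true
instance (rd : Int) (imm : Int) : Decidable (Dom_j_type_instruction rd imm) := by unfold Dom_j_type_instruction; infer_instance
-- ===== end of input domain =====

-- B replaces A's sign branch and string-level two's complement by one modular reduction
-- imm % (1 << 21) (objective: simpler); the field extraction and final formatting are the task
-- itself and stay as in A.

-- ===== PORT A =====
-- shared Python-builtin helpers (binary formatting/parsing, exact on the values they receive here)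

/-- `format(n, 'b')` for `n ≥ 0`: MSB-first binary digit characters (`'0'` for 0). Exact. -/
def pyBinChars (n : Nat) : List Char :=
  if n = 0 then ['0'] else (Nat.digits 2 n).reverse.map (fun d => if d = 1 then '1' else '0')

/-- `format(n, '0{w}b')` for `n ≥ 0`: zero-pad the binary digits on the left to width `w`. Exact. -/
def pyFmtPad (n w : Nat) : List Char :=
  List.replicate (w - (pyBinChars n).length) '0' ++ pyBinChars n

/-- `int(s, 2)` on a string of `'0'`/`'1'` characters (the only strings fed to it here). Exact. -/
def parseBin (cs : List Char) : Nat :=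
  cs.foldl (fun acc c => 2 * acc + (if c = '1' then 1 else 0)) 0

/-- `int(s, 2)` also accepting a `0b` prefix, as produced by `bin`. Exact on such strings. -/
def parseBin2 (cs : List Char) : Nat :=
  if cs.take 2 = ['0', 'b'] then parseBin (cs.drop 2) else parseBin cs

/-- `format(n, '032b')` for an arbitrary int: the sign counts toward the width, the pad width is a
minimum. Exact. -/
def pyFmt32 (n : Int) : String :=
  if 0 ≤ n then String.mk (pyFmtPad n.toNat 32) else String.mk ('-' :: pyFmtPad n.natAbs 31)

def j_type_instruction (rd : Int) (imm : Int) : String :=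
  -- `x & ((1 << 21) - 1)`: Int.land is Python's `&` (two's complement); both operands of the
  -- branch are nonnegative here, so `.toNat` is the identity embedding into Nat.
  let immv : Nat :=
    if imm ≥ 0 then
      parseBin (pyFmtPad (Int.land imm ((1 <<< 21) - 1)).toNat 21)
    else
      let s := pyFmtPad (Int.land (-imm) ((1 <<< 21) - 1)).toNat 21
      let inverted := s.map (fun bit => if bit = '0' then '1' else '0')
      let twos_comp := '0' :: 'b' :: pyBinChars (parseBin inverted + 1)   -- bin(int(inverted,2)+1)
      parseBin2 twos_comp
  let imm20 := (immv >>> 20) &&& 0b1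
  let imm10_1 := (immv >>> 1) &&& 0b1111111111
  let imm11 := (immv >>> 11) &&& 0b1
  let imm19_12 := (immv >>> 12) &&& 0b1111111
  let opcode : Int := 0b1101111
  -- the field shifts act on nonnegative values (Nat, exact); `rd << 7` is `rd * 2^7` (exact for
  -- negative rd too); `|` on possibly negative ints is Int.lor (two's complement, as in Python)
  pyFmt32 (Int.lor (Int.lor (Int.lor (Int.lor (Int.lor
    ((imm20 <<< 31 : Nat) : Int) ((imm10_1 <<< 21 : Nat) : Int)) ((imm11 <<< 20 : Nat) : Int))
    ((imm19_12 <<< 12 : Nat) : Int)) (rd * 128)) opcode)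

-- ===== PORT B =====
def j_type_instruction_alt (rd : Int) (imm : Int) : String :=
  -- `imm % (1 << 21)`: Python `%` with a positive divisor is Int.emod (Lean's `%`), result in [0, 2^21)
  let v : Nat := (imm % (1 <<< 21)).toNat
  let imm20 := (v >>> 20) &&& 0b1
  let imm10_1 := (v >>> 1) &&& 0b1111111111
  let imm11 := (v >>> 11) &&& 0b1
  let imm19_12 := (v >>> 12) &&& 0b1111111
  let opcode : Int := 0b1101111
  pyFmt32 (Int.lor (Int.lor (Int.lor (Int.lor (Int.lor
    ((imm20 <<< 31 : Nat) : Int) ((imm10_1 <<< 21 : Nat) : Int)) ((imm11 <<< 20 : Nat) : Int))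
    ((imm19_12 <<< 12 : Nat) : Int)) (rd * 128)) opcode)

-- ===== PRECONDITION & SPEC =====
def Spec_j_type_instruction (rd : Int) (imm : Int) (out : String) : Prop := out = j_type_instruction_alt rd imm
instance (rd : Int) (imm : Int) (out : String) : Decidable (Spec_j_type_instruction rd imm out) := by unfold Spec_j_type_instruction; infer_instance

-- ===== CLAIM (what is proved, stated in full; the proofs are below) =====
def Claim_equal_j_type_instruction : Prop := ∀ (rd : Int) (imm : Int), Dom_j_type_instruction rd imm → Spec_j_type_instruction rd imm (j_type_instruction rd imm)

-- ===== LEMMAS AND PROOFS =====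

/-- The shared tail of both ports: field extraction and assembly from the reduced immediate. -/
def jTail (rd : Int) (immv : Nat) : String :=
  let imm20 := (immv >>> 20) &&& 0b1
  let imm10_1 := (immv >>> 1) &&& 0b1111111111
  let imm11 := (immv >>> 11) &&& 0b1
  let imm19_12 := (immv >>> 12) &&& 0b1111111
  let opcode : Int := 0b1101111
  pyFmt32 (Int.lor (Int.lor (Int.lor (Int.lor (Int.lor
    ((imm20 <<< 31 : Nat) : Int) ((imm10_1 <<< 21 : Nat) : Int)) ((imm11 <<< 20 : Nat) : Int))
    ((imm19_12 <<< 12 : Nat) : Int)) (rd * 128)) opcode)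

/-- A's reduced immediate, factored out of the port (definitional). -/
def immvA (imm : Int) : Nat :=
  if imm ≥ 0 then
    parseBin (pyFmtPad (Int.land imm ((1 <<< 21) - 1)).toNat 21)
  else
    let s := pyFmtPad (Int.land (-imm) ((1 <<< 21) - 1)).toNat 21
    let inverted := s.map (fun bit => if bit = '0' then '1' else '0')
    let twos_comp := '0' :: 'b' :: pyBinChars (parseBin inverted + 1)
    parseBin2 twos_comp

theorem A_char (rd imm : Int) : j_type_instruction rd imm = jTail rd (immvA imm) := rfl

theorem B_char (rd imm : Int) :
    j_type_instruction_alt rd imm = jTail rd ((imm % (1 <<< 21)).toNat) := rfl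

theorem jTail_congr (rd : Int) {x y : Nat}
    (h20 : (x >>> 20) &&& 1 = (y >>> 20) &&& 1)
    (h10 : (x >>> 1) &&& 1023 = (y >>> 1) &&& 1023)
    (h11 : (x >>> 11) &&& 1 = (y >>> 11) &&& 1)
    (h19 : (x >>> 12) &&& 127 = (y >>> 12) &&& 127) : jTail rd x = jTail rd y := by
  simp only [jTail]
  rw [h20, h10, h11, h19]

theorem parse_foldl_rev (l : List Nat) (a : Nat) (h : ∀ d ∈ l, d < 2) :
    List.foldl (fun acc c => 2 * acc + (if c = '1' then 1 else 0)) a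
      (l.reverse.map (fun d => if d = 1 then '1' else '0'))
    = a * 2 ^ l.length + Nat.ofDigits 2 l := by
  induction l generalizing a with
  | nil => simp
  | cons d t ih =>
    have hd : d < 2 := h d (by simp)
    have ht : ∀ x ∈ t, x < 2 := fun x hx => h x (by simp [hx])
    simp only [List.reverse_cons, List.map_append, List.foldl_append, List.map_cons, List.map_nil,
      List.foldl_cons, List.foldl_nil, ih a ht, Nat.ofDigits_cons, List.length_cons]
    have hbit : (if (if d = 1 then '1' else '0') = '1' then 1 else 0) = d := by
      interval_cases d <;> simp
    rw [hbit]
    ring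

theorem parseBin_pyBinChars (n : Nat) : parseBin (pyBinChars n) = n := by
  unfold parseBin pyBinChars
  by_cases h : n = 0
  · subst h; simp
  · rw [if_neg h, parse_foldl_rev _ 0 (fun d hd => Nat.digits_lt_base (by norm_num) hd)]
    simp [Nat.ofDigits_digits]

theorem parseBin_replicate_zero (k : Nat) (s : List Char) :
    parseBin (List.replicate k '0' ++ s) = parseBin s := by
  unfold parseBin
  rw [List.foldl_append]
  have : List.foldl (fun acc c => 2 * acc + (if c = '1' then 1 else 0)) 0
      (List.replicate k '0') = 0 := by
    induction k with
    | zero => rfl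
    | succ k ih => simpa [List.replicate_succ] using ih
  rw [this]

theorem parseBin_pyFmtPad (n w : Nat) : parseBin (pyFmtPad n w) = n := by
  unfold pyFmtPad
  rw [parseBin_replicate_zero, parseBin_pyBinChars]

theorem length_pyFmtPad {n w : Nat} (h1 : 1 ≤ w) (h : n < 2 ^ w) :
    (pyFmtPad n w).length = w := by
  have hle : (pyBinChars n).length ≤ w := by
    unfold pyBinChars
    split
    · simpa
    · simp only [List.length_map, List.length_reverse]
      exact (Nat.digits_length_le_iff (by norm_num) n).mpr h
  simp only [pyFmtPad, List.length_append, List.length_replicate]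
  omega

theorem pyFmtPad_bits {n w : Nat} : ∀ c ∈ pyFmtPad n w, c = '0' ∨ c = '1' := by
  intro c hc
  rcases List.mem_append.1 hc with h | h
  · exact Or.inl (List.eq_of_mem_replicate h)
  · unfold pyBinChars at h
    split at h
    · simp at h; exact Or.inl h
    · obtain ⟨d, -, rfl⟩ := List.mem_map.1 h
      split
      · exact Or.inr rfl
      · exact Or.inl rfl

theorem parse_inv (cs : List Char) (a b : Nat) (h : ∀ c ∈ cs, c = '0' ∨ c = '1') :
    List.foldl (fun acc c => 2 * acc + (if c = '1' then 1 else 0)) a cs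
      + List.foldl (fun acc c => 2 * acc + (if c = '1' then 1 else 0)) b
          (cs.map (fun c => if c = '0' then '1' else '0'))
    = (a + b) * 2 ^ cs.length + (2 ^ cs.length - 1) := by
  induction cs generalizing a b with
  | nil => simp
  | cons c t ih =>
    have hc := h c (by simp)
    have ht : ∀ x ∈ t, x = '0' ∨ x = '1' := fun x hx => h x (by simp [hx])
    simp only [List.map_cons, List.foldl_cons, List.length_cons]
    have hP : 1 ≤ 2 ^ t.length := Nat.one_le_two_pow
    rcases hc with rfl | rfl <;>
    · simp only [reduceIte, Char.reduceEq, add_zero]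
      rw [ih _ _ ht]
      rw [pow_succ]
      generalize 2 ^ t.length = P at hP ⊢
      zify [hP, (by omega : 1 ≤ P * 2)]
      ring

/-- On the negative branch: inverting the 21 zero-padded bits of `m` and adding 1 yields `2^21 - m`. -/
theorem invert_add_one {m : Nat} (hm : m < 2 ^ 21) :
    parseBin ((pyFmtPad m 21).map (fun bit => if bit = '0' then '1' else '0')) + 1
      = 2 ^ 21 - m := by
  have h5 := parse_inv (pyFmtPad m 21) 0 0 pyFmtPad_bits
  rw [length_pyFmtPad (by norm_num) hm] at h5
  have h3 : parseBin (pyFmtPad m 21) = m := parseBin_pyFmtPad m 21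
  unfold parseBin at h3 ⊢
  omega

theorem parseBin2_bin (t : Nat) : parseBin2 ('0' :: 'b' :: pyBinChars t) = t := by
  simp only [parseBin2, List.take, List.drop, reduceIte]
  exact parseBin_pyBinChars t

/-- Python's `x & ((1 << 21) - 1)` equals `x % 2^21` for nonnegative `x`. -/
theorem land_mask (x : Int) (hx : 0 ≤ x) : Int.land x ((1 <<< 21) - 1) = x % (1 <<< 21) := by
  obtain ⟨n, rfl⟩ := Int.eq_ofNat_of_zero_le hx
  have h1 : ((1 <<< 21 : Int) - 1) = Int.ofNat (2 ^ 21 - 1) := by decide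
  have h2 : (1 <<< 21 : Int) = Int.ofNat (2 ^ 21) := by decide
  rw [h1, h2]
  show Int.ofNat (n &&& (2 ^ 21 - 1)) = _
  rw [Nat.and_two_pow_sub_one_eq_mod]
  rfl

/-- A's reduced immediate is `imm % 2^21`, except that the string two's complement overflows to
`2^21` exactly when the low 21 bits are zero. -/
theorem immvA_val (imm : Int) :
    immvA imm = (imm % (1 <<< 21)).toNat ∨ (imm % (1 <<< 21) = 0 ∧ immvA imm = 2 ^ 21) := by
  have hN : (1 <<< 21 : Int) = 2097152 := by decide
  unfold immvA
  by_cases h : imm ≥ 0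
  · left
    rw [if_pos h, parseBin_pyFmtPad, land_mask imm h]
  · rw [if_neg h]
    have hneg : (0 : Int) ≤ -imm := by omega
    rw [land_mask (-imm) hneg]
    simp only [hN]
    have hmod : (0 : Int) ≤ (-imm) % 2097152 ∧ (-imm) % 2097152 < 2 ^ 21 :=
      ⟨Int.emod_nonneg _ (by decide), Int.emod_lt_of_pos _ (by decide)⟩
    set M : Int := (-imm) % 2097152 with hM
    have hmlt : M.toNat < 2 ^ 21 := by omega
    rw [invert_add_one hmlt, parseBin2_bin]
    have hv : (0 : Int) ≤ imm % 2097152 ∧ imm % 2097152 < 2 ^ 21 :=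
      ⟨Int.emod_nonneg _ (by decide), Int.emod_lt_of_pos _ (by decide)⟩
    by_cases hM0 : M = 0
    · right
      constructor
      · omega
      · rw [hM0]; rfl
    · left
      omega

-- ===== VERDICT (by name: the statement is the Claim_ definition above) =====
theorem j_type_instruction_spec : Claim_equal_j_type_instruction := by
  intro rd imm _
  show j_type_instruction rd imm = j_type_instruction_alt rd imm
  rw [A_char, B_char]
  rcases immvA_val imm with hv | ⟨h0, hv⟩
  · rw [hv]
  · rw [hv, h0]
    exact jTail_congr rd (by decide) (by decide) (by decide) (by decide)
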